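-- pv_equiv track=rewrite | github.com/mbamber/AdventOfCode2018 | day06/main.py | get_min_manhatten_distance
-- ===== SOURCE A (Python) =====
-- def get_min_manhatten_distance(coord, coords, grid):
--
--     curr_min = (None, 99999999999999999)
--     is_duplicate = False
--
--     for curr_coord in coords:
--         curr_distance = get_manhatten_distance(coord, curr_coord)
--         if curr_distance < curr_min[1]:
--             curr_min = (curr_coord, curr_distance)
--             is_duplicate = False
--             continue
--         if curr_distance == curr_min[1]:
--             is_duplicate = True
--
--     if is_duplicate:
--         return 0
--
--     min_point = curr_min[0]
--     return grid[min_point[1]][min_point[0]]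
--
-- def get_manhatten_distance(A, B):
--     delta_x = abs(A[0] - B[0])
--     delta_y = abs(A[1] - B[1])
--     return delta_x + delta_y
-- ===== SOURCE B (Python) =====
-- def get_min_manhatten_distance(coord, coords, grid):
--     distances = [get_manhatten_distance(coord, c) for c in coords]
--     dmin = min(distances)
--     if distances.count(dmin) > 1:
--         return 0
--     x, y = coords[distances.index(dmin)]
--     return grid[y][x]
--
-- def get_manhatten_distance(A, B):
--     delta_x = abs(A[0] - B[0])
--     delta_y = abs(A[1] - B[1])
--     return delta_x + delta_y
-- ===== Notes on version B (the rewrite author's own statement) =====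
-- stated objective: simpler
-- what changed: Replaces A's single running-min scan with a mutable (point,distance,duplicate-flag) state by a build-the-distance-table decomposition: a list of distances, min() for the minimum, count() for the tie test, index() to recover the nearest point.
import Mathlib
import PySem

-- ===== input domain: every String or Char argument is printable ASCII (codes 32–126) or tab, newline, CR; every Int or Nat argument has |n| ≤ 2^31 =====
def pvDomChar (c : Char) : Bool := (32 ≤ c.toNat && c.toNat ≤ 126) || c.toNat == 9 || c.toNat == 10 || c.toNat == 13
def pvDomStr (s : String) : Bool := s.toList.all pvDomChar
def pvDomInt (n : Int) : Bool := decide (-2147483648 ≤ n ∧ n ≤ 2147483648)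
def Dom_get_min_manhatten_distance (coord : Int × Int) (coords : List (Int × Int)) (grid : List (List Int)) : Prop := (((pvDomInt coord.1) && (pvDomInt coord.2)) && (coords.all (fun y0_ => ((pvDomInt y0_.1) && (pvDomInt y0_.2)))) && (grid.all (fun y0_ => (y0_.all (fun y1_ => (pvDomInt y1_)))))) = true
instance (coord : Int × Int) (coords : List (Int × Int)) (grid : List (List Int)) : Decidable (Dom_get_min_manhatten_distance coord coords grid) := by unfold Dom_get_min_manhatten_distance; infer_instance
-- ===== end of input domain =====

-- B replaces A's running-min/tie-flag scan by a distance table queried with min/count/index (objective: simpler).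
-- Pre_ excludes empty coords (A raises TypeError) and unique-min inputs whose grid cell is out of range (IndexError).

-- ===== PORT A =====
def get_manhatten_distance (A B : Int × Int) : Int :=
  let delta_x := |A.1 - B.1|
  let delta_y := |A.2 - B.2|
  delta_x + delta_y

def get_min_manhatten_distance (coord : Int × Int) (coords : List (Int × Int)) (grid : List (List Int)) : Int :=
  let fin := coords.foldl (fun s curr_coord =>
      let curr_distance := get_manhatten_distance coord curr_coord
      if curr_distance < s.2.1 then (some curr_coord, curr_distance, false)
      else if curr_distance = s.2.1 then (s.1, s.2.1, true)
      else s)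
    ((none : Option (Int × Int)), (99999999999999999 : Int), false)
  if fin.2.2 then 0
  else
    match fin.1 with
    | some min_point =>
        (((PySem.List.pyGet? grid min_point.2).bind (fun row => PySem.List.pyGet? row min_point.1)).getD 0)
    | none => 0   -- Python: grid[None[1]] raises TypeError; excluded by Pre_

-- ===== PORT B =====
def get_min_manhatten_distance_alt (coord : Int × Int) (coords : List (Int × Int)) (grid : List (List Int)) : Int :=
  let distances := coords.map (fun c => get_manhatten_distance coord c)
  match PySem.List.min? distances (fun x => x) with
  | none => 0   -- Python: min([]) raises ValueError; excluded by Pre_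
  | some dmin =>
    if 1 < PySem.List.count distances dmin then 0
    else
      match PySem.List.index? distances dmin with
      | none => 0
      | some i =>
        match PySem.List.pyGet? coords (i : Int) with
        | none => 0
        | some p =>
            (((PySem.List.pyGet? grid p.2).bind (fun row => PySem.List.pyGet? row p.1)).getD 0)

-- ===== PRECONDITION & SPEC =====
-- Pre_ excludes exactly the inputs where Python A raises: empty coords (TypeError via None subscript),
-- and a unique nearest point whose grid lookup is out of range (IndexError).
def Pre_get_min_manhatten_distance (coord : Int × Int) (coords : List (Int × Int)) (grid : List (List Int)) : Prop :=
  coords ≠ [] ∧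
  ((let ds := coords.map (fun c => |coord.1 - c.1| + |coord.2 - c.2|);
    let m := (PySem.List.min? ds (fun x => x)).getD 0;
    decide (1 < PySem.List.count ds m) ||
      (match coords.find? (fun c => |coord.1 - c.1| + |coord.2 - c.2| == m) with
       | some p => ((PySem.List.pyGet? grid p.2).bind (fun row => PySem.List.pyGet? row p.1)).isSome
       | none => true)) = true)
instance (coord : Int × Int) (coords : List (Int × Int)) (grid : List (List Int)) : Decidable (Pre_get_min_manhatten_distance coord coords grid) := by unfold Pre_get_min_manhatten_distance; infer_instance

def pvWitness_get_min_manhatten_distance : (Int × Int) × (List (Int × Int)) × List (List Int) :=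
  ((0, 0), [(1, 0)], [[7, 5]])

def Spec_get_min_manhatten_distance (coord : Int × Int) (coords : List (Int × Int)) (grid : List (List Int)) (out : Int) : Prop := out = get_min_manhatten_distance_alt coord coords grid
instance (coord : Int × Int) (coords : List (Int × Int)) (grid : List (List Int)) (out : Int) : Decidable (Spec_get_min_manhatten_distance coord coords grid out) := by unfold Spec_get_min_manhatten_distance; infer_instance

-- ===== CLAIM (what is proved, stated in full; the proofs are below) =====
def Claim_equal_get_min_manhatten_distance : Prop := ∀ (coord : Int × Int) (coords : List (Int × Int)) (grid : List (List Int)), Dom_get_min_manhatten_distance coord coords grid → Pre_get_min_manhatten_distance coord coords grid → Spec_get_min_manhatten_distance coord coords grid (get_min_manhatten_distance coord coords grid)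

-- ===== LEMMAS AND PROOFS =====

-- min over a list extended on the right
lemma min?_append_singleton (xs : List Int) (y : Int) :
    PySem.List.min? (xs ++ [y]) (fun x => x) =
      some (match PySem.List.min? xs (fun x => x) with | none => y | some m => min m y) := by
  cases xs with
  | nil => simp [PySem.List.min?]
  | cons x t =>
      rw [List.cons_append, PySem.List.min?_id_cons, PySem.List.min?_id_cons]
      simp [List.foldl_append]

-- recovering the nearest point with index?+pyGet? is find? on the predicate
lemma index_get_eq_find (f : (Int × Int) → Int) (m : Int) :
    ∀ (xs : List (Int × Int)),
      (match PySem.List.index? (xs.map f) m with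
       | none => none
       | some i => PySem.List.pyGet? xs (i : Int)) =
      xs.find? (fun c => f c == m) := by
  intro xs
  induction xs with
  | nil => rw [PySem.List.index?_eq_idxOf?]; simp
  | cons x t ih =>
      rw [List.map_cons]
      by_cases h : f x = m
      · rw [h, PySem.List.index?_cons_self, List.find?_cons_of_pos (by simp [h])]
        simp
      · rw [PySem.List.index?_cons_of_ne _ (by simpa using h),
            List.find?_cons_of_neg (by simpa using h), ← ih]
        cases hidx : PySem.List.index? (t.map f) m with
        | none => simp
        | some i =>
            simp only [Option.map_some]
            rw [show ((i + 1 : Nat) : Int) = ((i : Nat) : Int) + 1 by push_cast; ring]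
            rw [PySem.List.pyGet?_cons_succ]

-- characterization of A's fold, assuming every distance is below the sentinel
lemma foldA_spec (coord : Int × Int) (xs : List (Int × Int))
    (hb : ∀ c ∈ xs, get_manhatten_distance coord c < 99999999999999999) :
    xs.foldl (fun s curr_coord =>
      if get_manhatten_distance coord curr_coord < s.2.1 then
        (some curr_coord, get_manhatten_distance coord curr_coord, false)
      else if get_manhatten_distance coord curr_coord = s.2.1 then (s.1, s.2.1, true)
      else s)
      ((none : Option (Int × Int)), (99999999999999999 : Int), false) =
    (match PySem.List.min? (xs.map (fun c => get_manhatten_distance coord c)) (fun x => x) with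
     | none => ((none : Option (Int × Int)), (99999999999999999 : Int), false)
     | some m => (xs.find? (fun c => get_manhatten_distance coord c == m), m,
                  decide (1 < PySem.List.count (xs.map (fun c => get_manhatten_distance coord c)) m))) := by
  induction xs using List.reverseRecOn with
  | nil => simp [PySem.List.min?]
  | append_singleton t c ih =>
      have hbt : ∀ x ∈ t, get_manhatten_distance coord x < 99999999999999999 := by
        intro x hx; exact hb x (by simp [hx])
      have hbc : get_manhatten_distance coord c < 99999999999999999 := hb c (by simp)
      rw [List.foldl_append, ih hbt]
      simp only [List.map_append, List.map_cons, List.map_nil]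
      rw [min?_append_singleton]
      cases hmin : PySem.List.min? (t.map (fun c => get_manhatten_distance coord c)) (fun x => x) with
      | none =>
          have ht : t = [] := by
            have := (PySem.List.min?_eq_none_iff _ _).mp hmin
            simpa using this
          subst ht
          simp [List.foldl, hbc, PySem.List.count]
      | some m =>
          have hmem : m ∈ t.map (fun c => get_manhatten_distance coord c) :=
            PySem.List.min?_mem hmin
          have hle : ∀ y ∈ t.map (fun c => get_manhatten_distance coord c), m ≤ y := by
            intro y hy; exact PySem.List.min?_isMin hmin y hy
          have hfind : (t.find? (fun c => get_manhatten_distance coord c == m)).isSome := by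
            obtain ⟨x, hx, hfx⟩ := List.mem_map.mp hmem
            exact List.find?_isSome.mpr ⟨x, hx, by simp [hfx]⟩
          have hcount1 : 1 ≤ (t.map (fun c => get_manhatten_distance coord c)).count m :=
            List.one_le_count_iff.mpr hmem
          rcases lt_trichotomy (get_manhatten_distance coord c) m with hlt | heq | hgt
          · -- new strict minimum at the end
            have hmin' : min m (get_manhatten_distance coord c) = get_manhatten_distance coord c :=
              min_eq_right (le_of_lt hlt)
            have hnone : t.find? (fun x => get_manhatten_distance coord x == get_manhatten_distance coord c) = none := by
              rw [List.find?_eq_none]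
              intro x hx
              have hx' : m ≤ get_manhatten_distance coord x := by
                simpa using hle _ (List.mem_map_of_mem (f := fun c => get_manhatten_distance coord c) hx)
              simp only [beq_iff_eq]
              omega
            have hcnt0 : (t.map (fun c => get_manhatten_distance coord c)).count (get_manhatten_distance coord c) = 0 := by
              rw [List.count_eq_zero]
              intro hmem'
              have := hle _ hmem'
              omega
            simp only [hmin']
            simp [hlt, List.find?_append, hnone, PySem.List.count, List.count_append, hcnt0]
          · -- equal: duplicate flag set
            obtain ⟨p, hp⟩ := Option.isSome_iff_exists.mp hfind
            simp only [min_eq_left (le_of_eq heq.symm), List.foldl_cons, List.foldl_nil]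
            rw [if_neg (by omega), if_pos heq]
            simp [List.find?_append, hp, PySem.List.count, List.count_append, heq]
            obtain ⟨x, hx, hfx⟩ := List.mem_map.mp hmem
            exact ⟨x.1, x.2, by simpa using hx, by simpa using hfx⟩
          · -- larger: state unchanged
            obtain ⟨p, hp⟩ := Option.isSome_iff_exists.mp hfind
            have hcntc : (List.count m [get_manhatten_distance coord c]) = 0 := by
              rw [List.count_eq_zero]
              simp
              omega
            simp only [min_eq_left (le_of_lt hgt), List.foldl_cons, List.foldl_nil]
            rw [if_neg (by omega), if_neg (by omega)]
            simp [List.find?_append, hp, PySem.List.count, List.count_append, hcntc]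

-- Dom bounds every distance below A's sentinel
lemma dist_lt_sentinel (coord : Int × Int) (coords : List (Int × Int)) (grid : List (List Int))
    (hD : Dom_get_min_manhatten_distance coord coords grid) :
    ∀ c ∈ coords, get_manhatten_distance coord c < 99999999999999999 := by
  intro c hc
  unfold Dom_get_min_manhatten_distance at hD
  simp only [Bool.and_eq_true, List.all_eq_true, pvDomInt, decide_eq_true_eq] at hD
  obtain ⟨⟨⟨h1, h2⟩, hall⟩, -⟩ := hD
  have hc' := hall c hc
  have hgm : get_manhatten_distance coord c = |coord.1 - c.1| + |coord.2 - c.2| := rfl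
  rw [hgm]
  rcases abs_cases (coord.1 - c.1) with ⟨e1, _⟩ | ⟨e1, _⟩ <;>
    rcases abs_cases (coord.2 - c.2) with ⟨e2, _⟩ | ⟨e2, _⟩ <;> omega

-- ===== VERDICT (by name: the statement is the Claim_ definition above) =====
theorem get_min_manhatten_distance_spec : Claim_equal_get_min_manhatten_distance := by
  intro coord coords grid hD hPre
  obtain ⟨hne, hPreB⟩ := hPre
  have hb := dist_lt_sentinel coord coords grid hD
  cases hmin : PySem.List.min? (coords.map (fun c => get_manhatten_distance coord c)) (fun x => x) with
  | none =>
      exact absurd (by simpa using (PySem.List.min?_eq_none_iff _ _).mp hmin) hne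
  | some m =>
      simp only [Spec_get_min_manhatten_distance, get_min_manhatten_distance,
                 get_min_manhatten_distance_alt]
      rw [foldA_spec coord coords hb, hmin]
      simp only [PySem.List.count_eq]
      by_cases hdup : 1 < List.count m (coords.map (fun c => get_manhatten_distance coord c))
      · simp [hdup]
      · simp only [hdup, decide_false, Bool.false_eq_true, if_false]
        rw [← index_get_eq_find (fun c => get_manhatten_distance coord c) m coords]
        cases hidx : PySem.List.index? (coords.map (fun c => get_manhatten_distance coord c)) m with
        | none => simp
        | some i =>
            simp only
            cases hget : PySem.List.pyGet? coords (i : Int) with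
            | none => simp
            | some p => simp
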